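-- pv_equiv track=rewrite | github.com/GiulianoWasHere/QuL | minimalWorkProtocol.py | _elementsToBeSwapped
-- ===== SOURCE A (Python) =====
-- def _elementsToBeSwapped(list,count,halfOfStates):
--     swapList = []
--     for i in range(len(list)):
--         if(count[0] > halfOfStates):
--             return swapList
--         if(list[i] >= halfOfStates):
--             swapList.append(list[i])
--             stop = True
--         count[0] += 1
--
--     return swapList
-- ===== SOURCE B (Python) =====
-- def _elementsToBeSwapped(list, count, halfOfStates):
--     if not list:
--         return []
--     n = max(0, min(len(list), halfOfStates - count[0] + 1))
--     swapList = [x for x in list[:n] if x >= halfOfStates]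
--     count[0] += n
--     return swapList
-- ===== Notes on version B (the rewrite author's own statement) =====
-- stated objective: simpler
-- what changed: Replaces the per-iteration counter-check early-exit loop with an arithmetic cutoff n = max(0, min(len(list), halfOfStates - count[0] + 1)) followed by one filtered comprehension over the prefix and a single count[0] += n.
import Mathlib
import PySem

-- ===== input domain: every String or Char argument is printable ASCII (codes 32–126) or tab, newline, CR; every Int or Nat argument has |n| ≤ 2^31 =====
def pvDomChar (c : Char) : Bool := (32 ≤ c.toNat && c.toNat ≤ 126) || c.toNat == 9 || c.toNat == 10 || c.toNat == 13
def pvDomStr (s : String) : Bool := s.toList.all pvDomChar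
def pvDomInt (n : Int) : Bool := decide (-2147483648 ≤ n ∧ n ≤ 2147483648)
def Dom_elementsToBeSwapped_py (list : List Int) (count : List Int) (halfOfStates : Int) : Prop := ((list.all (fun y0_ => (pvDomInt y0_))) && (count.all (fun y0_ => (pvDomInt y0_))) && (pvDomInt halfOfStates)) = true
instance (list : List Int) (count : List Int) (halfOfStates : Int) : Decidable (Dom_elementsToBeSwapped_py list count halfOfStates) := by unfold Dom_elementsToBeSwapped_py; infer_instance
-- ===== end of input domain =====

-- B replaces A's per-element counter-check loop by an arithmetic cutoff plus one filter pass (objective: simpler).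
-- Both Pythons mutate count[0] in place identically (by the number of examined elements); the theorems here are about the return value.

-- ===== PORT A =====
-- A's loop: per iteration, early-return if the running count exceeds halfOfStates, else
-- optionally append list[i] and increment the count; c0 tracks count[0].
def pvAGo (half : Int) : List Int → Int → List Int
  | [], _ => []
  | x :: rest, c0 =>
    if c0 > half then []
    else if half ≤ x then x :: pvAGo half rest (c0 + 1)
    else pvAGo half rest (c0 + 1)

def elementsToBeSwapped_py (list : List Int) (count : List Int) (halfOfStates : Int) : List Int :=
  pvAGo halfOfStates list (count.headD 0)

-- ===== PORT B =====
-- n = max(0, min(len(list), halfOfStates - count[0] + 1)) is Int.toNat of the min (toNat clamps negatives to 0);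
-- swapList = [x for x in list[:n] if x >= halfOfStates].
def elementsToBeSwapped_py_alt (list : List Int) (count : List Int) (halfOfStates : Int) : List Int :=
  if list.isEmpty then []
  else
    let n : Nat := (min (list.length : Int) (halfOfStates - count.headD 0 + 1)).toNat
    (list.take n).filter (fun x => halfOfStates ≤ x)

-- ===== PRECONDITION & SPEC =====
-- Pre_ excludes a nonempty list with empty count, where both A and B raise IndexError on count[0].
def Pre_elementsToBeSwapped_py (list : List Int) (count : List Int) (halfOfStates : Int) : Prop :=
  list = [] ∨ count ≠ []
instance (list : List Int) (count : List Int) (halfOfStates : Int) : Decidable (Pre_elementsToBeSwapped_py list count halfOfStates) := by unfold Pre_elementsToBeSwapped_py; infer_instance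
def pvWitness_elementsToBeSwapped_py : List Int × List Int × Int := ([3, 1, 4], [0], 2)

def Spec_elementsToBeSwapped_py (list : List Int) (count : List Int) (halfOfStates : Int) (out : List Int) : Prop := out = elementsToBeSwapped_py_alt list count halfOfStates
instance (list : List Int) (count : List Int) (halfOfStates : Int) (out : List Int) : Decidable (Spec_elementsToBeSwapped_py list count halfOfStates out) := by unfold Spec_elementsToBeSwapped_py; infer_instance

-- ===== CLAIM (what is proved, stated in full; the proofs are below) =====
def Claim_equal_elementsToBeSwapped_py : Prop := ∀ (list : List Int) (count : List Int) (halfOfStates : Int), Dom_elementsToBeSwapped_py list count halfOfStates → Pre_elementsToBeSwapped_py list count halfOfStates → Spec_elementsToBeSwapped_py list count halfOfStates (elementsToBeSwapped_py list count halfOfStates)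

-- ===== LEMMAS AND PROOFS =====
lemma pvAGo_eq_filter_take (half : Int) :
    ∀ (l : List Int) (c0 : Int),
      pvAGo half l c0
        = (l.take (min (l.length : Int) (half - c0 + 1)).toNat).filter (fun x => half ≤ x) := by
  intro l
  induction l with
  | nil => intro c0; simp [pvAGo]
  | cons x rest ih =>
    intro c0
    by_cases h : c0 > half
    · have hn : (min ((x :: rest).length : Int) (half - c0 + 1)).toNat = 0 := by
        simp [List.length_cons]; omega
      rw [hn]
      simp [pvAGo, h]
    · have hpos : 0 < (min ((x :: rest).length : Int) (half - c0 + 1)).toNat := by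
        simp [List.length_cons]; omega
      have hpred : (min ((x :: rest).length : Int) (half - c0 + 1)).toNat
          = (min ((rest.length : Int)) (half - (c0 + 1) + 1)).toNat + 1 := by
        simp [List.length_cons]; omega
      rw [hpred]
      simp only [List.take_succ_cons, List.filter_cons]
      by_cases hx : half ≤ x
      · simp [pvAGo, h, hx, ih]
      · simp [pvAGo, h, hx, ih]

-- ===== VERDICT (by name: the statement is the Claim_ definition above) =====
theorem elementsToBeSwapped_py_spec : Claim_equal_elementsToBeSwapped_py := by
  intro list count half _ hpre
  unfold Spec_elementsToBeSwapped_py elementsToBeSwapped_py elementsToBeSwapped_py_alt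
  cases list with
  | nil => simp [pvAGo]
  | cons x rest =>
    simp only [List.isEmpty_cons, if_neg (by simp : ¬ (false = true))]
    exact pvAGo_eq_filter_take half (x :: rest) (count.headD 0)
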